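-- pv_equiv track=rewrite | github.com/Sentieon/segdup-caller | genecaller/genes/ikbkg.py | _collapse_copy_numbers
-- ===== SOURCE A (Python) =====
-- from typing import Dict, Any
--
-- _FLANK_TO_GENE = {
--     "IKBKG_5prime": "IKBKG",
--     "IKBKG_3prime": "IKBKG",
--     "IKBKGP1_5prime": "IKBKGP1",
--     "IKBKGP1_3prime": "IKBKGP1",
-- }
--
-- _SEGMENT_REGIONS = ("IKBKGdel", "IKBKGP1del")
--
-- def _collapse_copy_numbers(copy_numbers: Dict[str, int]) -> Dict[str, int]:
--     """Collapse 6 internal cn_regions into 3 reported values.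
--
--     Reported copy numbers:
--     - IKBKG: CN of flanking regions (= baseline + cn_diff of IKBKG_5prime)
--     - IKBKGP1: CN of flanking regions (= baseline + cn_diff of IKBKGP1_5prime)
--     - IKBKGdel_region: sum of IKBKGdel + IKBKGP1del (total 11.7kb
--       segment CN across both loci); the two segment regions contain no
--       differentiating variants so gene-vs-pseudogene attribution is not
--       possible.
--     """
--     collapsed = {}
--     seen_genes = set()
--     segment_total = 0
--
--     for region_name, cn in list(copy_numbers.items()):
--         if region_name in _SEGMENT_REGIONS:
--             segment_total += cn
--         elif region_name in _FLANK_TO_GENE: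
--             gene_name = _FLANK_TO_GENE[region_name]
--             if gene_name not in seen_genes:
--                 collapsed[gene_name] = cn
--                 seen_genes.add(gene_name)
--         else:
--             collapsed[region_name] = cn
--
--     collapsed["IKBKGdel_region (IKBKG+IKBKGP1 total)"] = segment_total
--     return collapsed
-- ===== SOURCE B (Python) =====
-- _FLANK_TO_GENE = {
--     "IKBKG_5prime": "IKBKG",
--     "IKBKG_3prime": "IKBKG",
--     "IKBKGP1_5prime": "IKBKGP1",
--     "IKBKGP1_3prime": "IKBKGP1",
-- }
--
-- _SEGMENT_REGIONS = ("IKBKGdel", "IKBKGP1del")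
--
--
-- def _collapse_copy_numbers(copy_numbers):
--     # pass 1: representative (first-seen) flank region name per gene
--     first_flank = {}
--     for name in copy_numbers:
--         gene = _FLANK_TO_GENE.get(name)
--         if gene is not None and gene not in first_flank:
--             first_flank[gene] = name
--     # pass 2: declarative rename/filter; dict() keeps first position, last value
--     collapsed = dict(
--         (_FLANK_TO_GENE.get(name, name), cn)
--         for name, cn in copy_numbers.items()
--         if name not in _SEGMENT_REGIONS
--         and (name not in _FLANK_TO_GENE or first_flank[_FLANK_TO_GENE[name]] == name)
--     )
--     collapsed["IKBKGdel_region (IKBKG+IKBKGP1 total)"] = sum(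
--         cn for name, cn in copy_numbers.items() if name in _SEGMENT_REGIONS
--     )
--     return collapsed
-- ===== Notes on version B (the rewrite author's own statement) =====
-- stated objective: alternative
-- what changed: A's single mutating loop carrying a collapsed dict, a seen-genes set and a running total is replaced by three declarative passes: a representative-flank map (gene -> first-seen flank name), a filter/rename dict comprehension that keeps only the representative flank of each gene, and a separate generator-expression sum for the segment total.
import Mathlib
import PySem

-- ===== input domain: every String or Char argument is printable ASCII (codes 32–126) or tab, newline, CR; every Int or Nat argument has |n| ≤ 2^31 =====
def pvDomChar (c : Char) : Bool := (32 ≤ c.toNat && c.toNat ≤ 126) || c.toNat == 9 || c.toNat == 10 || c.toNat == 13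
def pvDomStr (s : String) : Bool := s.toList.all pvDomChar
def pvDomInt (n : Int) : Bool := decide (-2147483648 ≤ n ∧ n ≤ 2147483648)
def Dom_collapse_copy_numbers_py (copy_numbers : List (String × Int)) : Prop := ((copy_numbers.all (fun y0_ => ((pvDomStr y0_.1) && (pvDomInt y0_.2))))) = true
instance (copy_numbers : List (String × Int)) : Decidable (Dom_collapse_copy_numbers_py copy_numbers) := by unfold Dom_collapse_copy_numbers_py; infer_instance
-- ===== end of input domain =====

-- B replaces A's single mutating loop (dict + seen-set + running total) by three declarative passes:
-- a representative-flank map, a filter/rename dict comprehension, and a separate segment sum (objective: alternative decomposition).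

-- ===== PORT A =====
def pvSegmentRegions : List String := ["IKBKGdel", "IKBKGP1del"]

def pvFlankToGene : PySem.Dict String String := PySem.Dict.ofList
  [("IKBKG_5prime", "IKBKG"), ("IKBKG_3prime", "IKBKG"),
   ("IKBKGP1_5prime", "IKBKGP1"), ("IKBKGP1_3prime", "IKBKGP1")]

def pvCollapsedKey : String := "IKBKGdel_region (IKBKG+IKBKGP1 total)"

-- loop body of A: state = (collapsed, seen_genes, segment_total)
def pvStepA (st : PySem.Dict String Int × PySem.Set String × Int) (p : String × Int) :
    PySem.Dict String Int × PySem.Set String × Int :=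
  if pvSegmentRegions.contains p.1 then (st.1, st.2.1, st.2.2 + p.2)
  else match pvFlankToGene.get? p.1 with
    | some g => if st.2.1.contains g then st else (st.1.insert g p.2, PySem.Set.add st.2.1 g, st.2.2)
    | none => (st.1.insert p.1 p.2, st.2.1, st.2.2)

def collapse_copy_numbers_py (copy_numbers : List (String × Int)) : List (String × Int) :=
  let st := copy_numbers.foldl pvStepA (PySem.Dict.empty, PySem.Set.empty, 0)
  (st.1.insert pvCollapsedKey st.2.2).items

-- ===== PORT B =====
-- pass 1 of B: gene -> name of its first-seen flank region
def pvFirstFlank (copy_numbers : List (String × Int)) : PySem.Dict String String :=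
  copy_numbers.foldl (fun ff p =>
    match pvFlankToGene.get? p.1 with
    | some g => if ff.contains g then ff else ff.insert g p.1
    | none => ff) PySem.Dict.empty

-- B's comprehension filter; 'first_flank[gene] == name' is ported as 'ff.get? g == some p.1'
-- (exact: whenever the branch is reached, pass 1 has put g into ff, so the Python lookup never raises)
def pvKeepB (ff : PySem.Dict String String) (p : String × Int) : Bool :=
  !pvSegmentRegions.contains p.1 &&
    (match pvFlankToGene.get? p.1 with
     | none => true
     | some g => ff.get? g == some p.1)

def collapse_copy_numbers_py_alt (copy_numbers : List (String × Int)) : List (String × Int) :=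
  let ff := pvFirstFlank copy_numbers
  let collapsed := PySem.Dict.ofList
    ((copy_numbers.filter (pvKeepB ff)).map (fun p => (pvFlankToGene.getD p.1 p.1, p.2)))
  (collapsed.insert pvCollapsedKey
    ((copy_numbers.filter (fun p => pvSegmentRegions.contains p.1)).map Prod.snd).sum).items

-- ===== PRECONDITION & SPEC =====
-- Pre_ excludes association lists with duplicate keys: the Python function's argument is a dict,
-- whose keys are distinct by construction, so such lists represent no actual input of A.
def Pre_collapse_copy_numbers_py (copy_numbers : List (String × Int)) : Prop :=
  (copy_numbers.map Prod.fst).Nodup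
instance (copy_numbers : List (String × Int)) : Decidable (Pre_collapse_copy_numbers_py copy_numbers) := by unfold Pre_collapse_copy_numbers_py; infer_instance

def pvWitness_collapse_copy_numbers_py : (List (String × Int)) :=
  [("IKBKG_5prime", 2), ("IKBKGdel", 1), ("foo", 3)]

def Spec_collapse_copy_numbers_py (copy_numbers : List (String × Int)) (out : List (String × Int)) : Prop := out = collapse_copy_numbers_py_alt copy_numbers
instance (copy_numbers : List (String × Int)) (out : List (String × Int)) : Decidable (Spec_collapse_copy_numbers_py copy_numbers out) := by unfold Spec_collapse_copy_numbers_py; infer_instance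

-- ===== CLAIM (what is proved, stated in full; the proofs are below) =====
def Claim_equal_collapse_copy_numbers_py : Prop := ∀ (copy_numbers : List (String × Int)), Dom_collapse_copy_numbers_py copy_numbers → Pre_collapse_copy_numbers_py copy_numbers → Spec_collapse_copy_numbers_py copy_numbers (collapse_copy_numbers_py copy_numbers)

-- ===== LEMMAS AND PROOFS =====

-- the set of genes A has seen after a prefix, recomputed standalone
def pvSeenOf (xs : List (String × Int)) : PySem.Set String :=
  xs.foldl (fun s p =>
    if pvSegmentRegions.contains p.1 then s
    else match pvFlankToGene.get? p.1 with
      | some g => PySem.Set.add s g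
      | none => s) PySem.Set.empty


lemma pvSeg_not_flank (n : String) (h : pvSegmentRegions.contains n = true) :
    pvFlankToGene.get? n = none := by
  simp [pvSegmentRegions] at h
  rcases h with h | h <;> subst h <;> decide

lemma pvContains_add (s : PySem.Set String) (x y : String) :
    (PySem.Set.add s x).contains y = (y == x || s.contains y) := by
  by_cases h : y = x <;> by_cases h2 : (y ∈ s) <;>
    simp [PySem.Set.contains, PySem.Set.mem_add, h, h2]

-- one appended item steps each of B's folds once
lemma pvFF_append (xs : List (String × Int)) (p : String × Int) :
    pvFirstFlank (xs ++ [p]) =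
      (match pvFlankToGene.get? p.1 with
       | some g => if (pvFirstFlank xs).contains g then pvFirstFlank xs
                   else (pvFirstFlank xs).insert g p.1
       | none => pvFirstFlank xs) := by
  rw [pvFirstFlank, List.foldl_append, List.foldl_cons, List.foldl_nil, ← pvFirstFlank]

lemma pvSeen_append (xs : List (String × Int)) (p : String × Int) :
    pvSeenOf (xs ++ [p]) =
      (if pvSegmentRegions.contains p.1 then pvSeenOf xs
       else match pvFlankToGene.get? p.1 with
         | some g => PySem.Set.add (pvSeenOf xs) g
         | none => pvSeenOf xs) := by
  rw [pvSeenOf, List.foldl_append, List.foldl_cons, List.foldl_nil, ← pvSeenOf]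

lemma pvSeen_contains_eq (xs : List (String × Int)) (g : String) :
    (pvSeenOf xs).contains g = (pvFirstFlank xs).contains g := by
  induction xs using List.reverseRecOn with
  | nil => rfl
  | append_singleton xs p ih =>
    rw [pvSeen_append, pvFF_append]
    by_cases hseg : pvSegmentRegions.contains p.1 = true
    · rw [if_pos hseg, pvSeg_not_flank p.1 hseg]; exact ih
    · rw [if_neg hseg]
      cases hfl : pvFlankToGene.get? p.1 with
      | none => exact ih
      | some g0 =>
        rw [pvContains_add, ih]
        by_cases hc : (pvFirstFlank xs).contains g0 = true
        · by_cases hg : g = g0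
          · simp [hg, hc]
          · simp [hg, hc]
        · simp [hc, PySem.Dict.contains_insert]

lemma pvFF_mem_keys (xs : List (String × Int)) (g f : String)
    (h : (pvFirstFlank xs).get? g = some f) : f ∈ xs.map Prod.fst := by
  induction xs using List.reverseRecOn with
  | nil => simp [pvFirstFlank, PySem.Dict.get?_empty] at h
  | append_singleton xs p ih =>
    rw [pvFF_append] at h
    rw [List.map_append]
    cases hfl : pvFlankToGene.get? p.1 with
    | none =>
      rw [hfl] at h
      exact List.mem_append_left _ (ih h)
    | some g0 =>
      simp only [hfl] at h
      by_cases hc : (pvFirstFlank xs).contains g0 = true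
      · rw [if_pos hc] at h
        exact List.mem_append_left _ (ih h)
      · rw [if_neg hc, PySem.Dict.get?_insert] at h
        split_ifs at h with hg
        · simp at h; simp [h]
        · exact List.mem_append_left _ (ih h)

lemma pvOfList_append (ps : List (String × Int)) (q : String × Int) :
    PySem.Dict.ofList (ps ++ [q]) = (PySem.Dict.ofList ps).insert q.1 q.2 := by
  simp [PySem.Dict.ofList, PySem.Dict.update, List.foldl_append]

lemma pvMain (xs : List (String × Int)) (h : (xs.map Prod.fst).Nodup) :
    xs.foldl pvStepA (PySem.Dict.empty, PySem.Set.empty, 0)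
      = (PySem.Dict.ofList ((xs.filter (pvKeepB (pvFirstFlank xs))).map
            (fun p => (pvFlankToGene.getD p.1 p.1, p.2))),
         pvSeenOf xs,
         ((xs.filter (fun p => pvSegmentRegions.contains p.1)).map Prod.snd).sum) := by
  induction xs using List.reverseRecOn with
  | nil => rfl
  | append_singleton xs p ih =>
    rw [List.map_append] at h
    rw [List.nodup_append] at h
    obtain ⟨h1, _, hdisj⟩ := h
    have h2 : p.1 ∉ xs.map Prod.fst := fun hm => hdisj p.1 hm p.1 (by simp) rfl
    rw [List.foldl_append, List.foldl_cons, List.foldl_nil, ih h1]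
    by_cases hseg : pvSegmentRegions.contains p.1 = true
    · have hsegm : p.1 ∈ pvSegmentRegions := by simpa using hseg
      have hnf := pvSeg_not_flank p.1 hseg
      have hff' : pvFirstFlank (xs ++ [p]) = pvFirstFlank xs := by
        simp only [pvFF_append, hnf]
      have hkeep : pvKeepB (pvFirstFlank xs) p = false := by
        simp [pvKeepB, hsegm]
      simp [pvStepA, hsegm, hff', hkeep, pvSeen_append,
            List.filter_append, List.map_append, List.sum_append]
    · have hsegm : p.1 ∉ pvSegmentRegions := by simpa using hseg
      cases hfl : pvFlankToGene.get? p.1 with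
      | none =>
        have hff' : pvFirstFlank (xs ++ [p]) = pvFirstFlank xs := by
          simp only [pvFF_append, hfl]
        have hkeep : pvKeepB (pvFirstFlank xs) p = true := by
          simp [pvKeepB, hsegm, hfl]
        have hgetD : pvFlankToGene.getD p.1 p.1 = p.1 :=
          PySem.Dict.getD_of_get?_eq_none _ _ hfl
        simp [pvStepA, hsegm, hfl, hff', hkeep, hgetD, pvSeen_append,
              List.filter_append, List.map_append, pvOfList_append]
      | some g0 =>
        have hgetD : pvFlankToGene.getD p.1 p.1 = g0 :=
          PySem.Dict.getD_of_get?_eq_some _ _ hfl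
        by_cases hc : (pvSeenOf xs).contains g0 = true
        · have hcm : g0 ∈ pvSeenOf xs := by simpa [PySem.Set.contains] using hc
          have hcF : (pvFirstFlank xs).contains g0 = true := by
            rw [← pvSeen_contains_eq]; exact hc
          obtain ⟨f, hf⟩ : ∃ f, (pvFirstFlank xs).get? g0 = some f := by
            have := PySem.Dict.contains_eq_isSome_get? (d := pvFirstFlank xs) (k := g0)
            rw [hcF] at this
            exact Option.isSome_iff_exists.mp this.symm
          have hfp : f ≠ p.1 := fun e => h2 (e ▸ pvFF_mem_keys xs g0 f hf)
          have hff' : pvFirstFlank (xs ++ [p]) = pvFirstFlank xs := by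
            simp only [pvFF_append, hfl, if_pos hcF]
          have hkeep : pvKeepB (pvFirstFlank xs) p = false := by
            simp [pvKeepB, hsegm, hfl, hf, hfp]
          have hseen : pvSeenOf (xs ++ [p]) = pvSeenOf xs := by
            rw [pvSeen_append, if_neg hseg, hfl]
            exact PySem.Set.add_of_mem (by simpa [PySem.Set.contains] using hc)
          simp [pvStepA, hsegm, hfl, hcm, hff', hkeep, hseen,
                List.filter_append]
        · have hcm : g0 ∉ pvSeenOf xs := by simpa [PySem.Set.contains] using hc
          have hcF : (pvFirstFlank xs).contains g0 = false := by
            rw [← pvSeen_contains_eq]; simpa using hc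
          have hnone : (pvFirstFlank xs).get? g0 = none := by
            rw [PySem.Dict.get?_eq_none_iff_contains, hcF]
          have hff' : pvFirstFlank (xs ++ [p]) = (pvFirstFlank xs).insert g0 p.1 := by
            simp only [pvFF_append, hfl, hcF, if_false, Bool.false_eq_true]
          have hkeep : pvKeepB ((pvFirstFlank xs).insert g0 p.1) p = true := by
            simp [pvKeepB, hsegm, hfl, PySem.Dict.get?_insert_self]
          have hfilter : xs.filter (pvKeepB ((pvFirstFlank xs).insert g0 p.1))
              = xs.filter (pvKeepB (pvFirstFlank xs)) := by
            apply List.filter_congr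
            intro q hq
            have hq1 : q.1 ≠ p.1 := fun e => h2 (e ▸ List.mem_map_of_mem hq)
            simp only [pvKeepB]
            cases hq2 : pvFlankToGene.get? q.1 with
            | none => rfl
            | some g1 =>
              by_cases hg : g1 = g0
              · subst hg
                simp [hnone, Ne.symm hq1]
              · simp [PySem.Dict.get?_insert, hg]
          simp [pvStepA, hsegm, hfl, hcm, hff', hkeep, hfilter, hgetD, pvSeen_append,
                List.filter_append, List.map_append, pvOfList_append]

-- ===== VERDICT (by name: the statement is the Claim_ definition above) =====
theorem collapse_copy_numbers_py_spec : Claim_equal_collapse_copy_numbers_py := by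
  intro xs _ hpre
  unfold Spec_collapse_copy_numbers_py collapse_copy_numbers_py collapse_copy_numbers_py_alt
  rw [pvMain xs hpre]
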